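-- pv_equiv track=rewrite | github.com/R0LDI/AyED1-2024-TPs | tp01/Ejercicio9.py | total_cajones
-- ===== SOURCE A (Python) =====
-- from typing import List
--
-- def total_cajones(l: List[int]) -> tuple[int]:
--     cajones = []
--     cantidad = 0
--     peso = 0
--     for naranja in l:
--         if naranja >= 200 and naranja <= 300:
--             peso += naranja
--             cantidad += 1
--         if cantidad == 100:
--             cajones.append(peso)
--             cantidad = 0
--             peso = 0
--     if cantidad:
--       cajones.append(peso)
--     sobrante = cantidad
--     return cajones, len(cajones), sobrante
-- ===== SOURCE B (Python) =====
-- from typing import List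
--
-- def _crates(v):
--     # split the valid oranges into full crates of 100 plus a leftover tail
--     if len(v) < 100:
--         return [], v
--     rest, leftover = _crates(v[100:])
--     return [sum(v[:100])] + rest, leftover
--
-- def total_cajones(l: List[int]) -> tuple:
--     valid = [n for n in l if 200 <= n <= 300]
--     cajones, leftover = _crates(valid)
--     if leftover:
--         cajones = cajones + [sum(leftover)]
--     return cajones, len(cajones), len(leftover)
-- ===== Notes on version B (the rewrite author's own statement) =====
-- stated objective: alternative
-- what changed: Replaces the single running-counter/weight loop that emits a crate each time the counter hits 100 with a filter-first pass followed by recursive chunking of the valid list into 100-element slices plus a leftover tail.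
import Mathlib
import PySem

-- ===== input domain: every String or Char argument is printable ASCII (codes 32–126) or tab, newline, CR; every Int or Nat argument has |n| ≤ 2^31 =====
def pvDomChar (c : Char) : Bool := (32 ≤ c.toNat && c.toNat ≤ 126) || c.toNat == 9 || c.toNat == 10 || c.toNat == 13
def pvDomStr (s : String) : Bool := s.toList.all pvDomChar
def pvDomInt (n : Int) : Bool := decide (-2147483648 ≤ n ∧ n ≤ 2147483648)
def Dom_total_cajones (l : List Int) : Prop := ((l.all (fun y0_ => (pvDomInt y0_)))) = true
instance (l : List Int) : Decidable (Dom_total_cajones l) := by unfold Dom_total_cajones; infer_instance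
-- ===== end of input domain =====

-- B replaces A's running counter/weight loop by filter-then-recursive-chunking; same cost, different decomposition.

-- ===== PORT A =====
-- one iteration of A's for-loop over state (cajones, cantidad, peso)
def stepA (s : List Int × Int × Int) (naranja : Int) : List Int × Int × Int :=
  let s1 := if naranja ≥ 200 ∧ naranja ≤ 300 then (s.1, s.2.1 + 1, s.2.2 + naranja) else s
  if s1.2.1 = 100 then (s1.1 ++ [s1.2.2], 0, 0) else s1

def total_cajones (l : List Int) : List Int × Int × Int :=
  let s := l.foldl stepA ([], 0, 0)
  let cajones := if s.2.1 ≠ 0 then s.1 ++ [s.2.2] else s.1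
  (cajones, (cajones.length : Int), s.2.1)

-- ===== PORT B =====
-- _crates: split the valid oranges into full crates of 100 plus the leftover tail
def crates (v : List Int) : List Int × List Int :=
  if v.length < 100 then ([], v)
  else
    let res := crates (PySem.List.slice v (some 100) none)   -- v[100:]
    ((PySem.List.slice v none (some 100)).sum :: res.1, res.2)  -- [sum(v[:100])] + rest
termination_by v.length
decreasing_by
  rw [PySem.List.slice_from v (by norm_num)]
  simp
  omega

def total_cajones_alt (l : List Int) : List Int × Int × Int :=
  let valid := l.filter (fun n => decide (200 ≤ n ∧ n ≤ 300))
  let r := crates valid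
  let cajones := if r.2 ≠ [] then r.1 ++ [r.2.sum] else r.1
  (cajones, (cajones.length : Int), (r.2.length : Int))

-- ===== PRECONDITION & SPEC =====
def Spec_total_cajones (l : List Int) (out : List Int × Int × Int) : Prop := out = total_cajones_alt l
instance (l : List Int) (out : List Int × Int × Int) : Decidable (Spec_total_cajones l out) := by unfold Spec_total_cajones; infer_instance

-- ===== CLAIM (what is proved, stated in full; the proofs are below) =====
def Claim_equal_total_cajones : Prop := ∀ (l : List Int), Dom_total_cajones l → Spec_total_cajones l (total_cajones l)

-- ===== LEMMAS AND PROOFS =====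

lemma crates_small (v : List Int) (h : v.length < 100) : crates v = ([], v) := by
  rw [crates.eq_def]; simp [h]

lemma crates_full (w r : List Int) (hw : w.length = 100) :
    crates (w ++ r) = (w.sum :: (crates r).1, (crates r).2) := by
  rw [crates.eq_def]
  rw [if_neg (by simp [hw])]
  have h1 : PySem.List.slice (w ++ r) none (some 100) = w := by
    rw [PySem.List.slice_to _ (by norm_num)]
    rw [show ((100 : Int).toNat) = w.length by omega, List.take_left]
  have h2 : PySem.List.slice (w ++ r) (some 100) none = r := by
    rw [PySem.List.slice_from _ (by norm_num)]
    rw [show ((100 : Int).toNat) = w.length by omega, List.drop_left]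
  rw [h1, h2]

lemma fold_crates (l : List Int) : ∀ (c u : List Int), u.length < 100 →
    l.foldl stepA (c, (u.length : Int), u.sum) =
      (c ++ (crates (u ++ l.filter (fun n => decide (200 ≤ n ∧ n ≤ 300)))).1,
       ((crates (u ++ l.filter (fun n => decide (200 ≤ n ∧ n ≤ 300)))).2.length : Int),
       (crates (u ++ l.filter (fun n => decide (200 ≤ n ∧ n ≤ 300)))).2.sum) := by
  induction l with
  | nil =>
      intro c u hu
      simp [crates_small u hu]
  | cons x t ih =>
      intro c u hu
      rw [List.foldl_cons]
      by_cases hP : 200 ≤ x ∧ x ≤ 300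
      · have hstep : stepA (c, (u.length : Int), u.sum) x =
            if (u.length : Int) + 1 = 100 then (c ++ [u.sum + x], 0, 0)
            else (c, (u.length : Int) + 1, u.sum + x) := by
          simp [stepA, hP.1, hP.2]
        have hfilter : (x :: t).filter (fun n => decide (200 ≤ n ∧ n ≤ 300)) =
            x :: t.filter (fun n => decide (200 ≤ n ∧ n ≤ 300)) := by
          simp [hP.1, hP.2]
        rw [hstep, hfilter]
        by_cases h99 : u.length = 99
        · rw [if_pos (by omega)]
          have h0 : ((c ++ [u.sum + x], (0 : Int), (0 : Int)) : List Int × Int × Int) =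
              (c ++ [u.sum + x], ((([] : List Int)).length : Int), ([] : List Int).sum) := by
            simp
          rw [h0, ih (c ++ [u.sum + x]) [] (by simp)]
          have hassoc : u ++ x :: t.filter (fun n => decide (200 ≤ n ∧ n ≤ 300)) =
              (u ++ [x]) ++ t.filter (fun n => decide (200 ≤ n ∧ n ≤ 300)) := by
            simp
          rw [hassoc, crates_full (u ++ [x]) _ (by simp [h99])]
          simp
        · rw [if_neg (by omega)]
          have h1 : ((c, (u.length : Int) + 1, u.sum + x) : List Int × Int × Int) =
              (c, ((u ++ [x]).length : Int), (u ++ [x]).sum) := by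
            simp
          rw [h1, ih c (u ++ [x]) (by simp; omega)]
          simp
      · have hstep : stepA (c, (u.length : Int), u.sum) x = (c, (u.length : Int), u.sum) := by
          have : ¬ (x ≥ 200 ∧ x ≤ 300) := by
            intro h; exact hP ⟨h.1, h.2⟩
          simp [stepA, this]
          omega
        have hfilter : (x :: t).filter (fun n => decide (200 ≤ n ∧ n ≤ 300)) =
            t.filter (fun n => decide (200 ≤ n ∧ n ≤ 300)) := by
          simp [hP]
        rw [hstep, hfilter, ih c u hu]

-- ===== VERDICT (by name: the statement is the Claim_ definition above) =====
theorem total_cajones_spec : Claim_equal_total_cajones := by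
  intro l _
  show total_cajones l = total_cajones_alt l
  unfold total_cajones total_cajones_alt
  have h0 : (([] : List Int), (0 : Int), (0 : Int)) =
      (([] : List Int), ((([] : List Int)).length : Int), ([] : List Int).sum) := by simp
  rw [h0, fold_crates l [] [] (by simp)]
  simp only [List.nil_append]
  set r := crates (l.filter (fun n => decide (200 ≤ n ∧ n ≤ 300))) with hr
  have hcond : ((r.2.length : Int) ≠ 0) = (r.2 ≠ []) := by
    simp [List.length_eq_zero_iff]
  simp [hcond]
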